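-- pv_equiv track=rewrite | github.com/ArpadGBondor/Codewars_Solutions | Python/6 kyu/0020.py | get_reversed_color
-- ===== SOURCE A (Python) =====
-- def get_reversed_color(hex_color):
--     if type(hex_color) != str:
--         raise ValueError("Wrong input type")
--
--     hex: str = hex_color.upper()
--
--     if len(hex) > 0 and hex[0] == "#":
--         hex = hex[1:]
--
--     hex = hex.rjust(6, "0")
--
--     if len(hex) > 6:
--         raise ValueError("Too long colour code")
--
--     complement: dict = {
--         "0": "F",
--         "1": "E",
--         "2": "D",
--         "3": "C",
--         "4": "B",
--         "5": "A",
--         "6": "9",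
--         "7": "8",
--         "8": "7",
--         "9": "6",
--         "A": "5",
--         "B": "4",
--         "C": "3",
--         "D": "2",
--         "E": "1",
--         "F": "0",
--     }
--
--     res: list[str] = []
--
--     for c in hex:
--         if not c in complement:
--             raise ValueError("Wrong colour code")
--         res.append(complement[c])
--
--     return f"#{''.join(res)}"
-- ===== SOURCE B (Python) =====
-- def get_reversed_color(hex_color):
--     if type(hex_color) != str:
--         raise ValueError("Wrong input type")
--
--     s = hex_color[1:] if hex_color[:1] == "#" else hex_color
--
--     if len(s) > 6:
--         raise ValueError("Too long colour code")
--
--     if any(c not in "0123456789abcdefABCDEF" for c in s):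
--         raise ValueError("Wrong colour code")
--
--     n = int(s, 16) if s else 0
--     return f"#{0xFFFFFF - n:06X}"
-- ===== Notes on version B (the rewrite author's own statement) =====
-- stated objective: simpler
-- what changed: B replaces A's uppercase-then-per-character 16-entry complement-dict loop by one arithmetic step: parse the hex string as an integer and return 0xFFFFFF minus it formatted back as 6 uppercase hex digits (leading zeros handled by the 06X format instead of rjust).
import Mathlib
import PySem

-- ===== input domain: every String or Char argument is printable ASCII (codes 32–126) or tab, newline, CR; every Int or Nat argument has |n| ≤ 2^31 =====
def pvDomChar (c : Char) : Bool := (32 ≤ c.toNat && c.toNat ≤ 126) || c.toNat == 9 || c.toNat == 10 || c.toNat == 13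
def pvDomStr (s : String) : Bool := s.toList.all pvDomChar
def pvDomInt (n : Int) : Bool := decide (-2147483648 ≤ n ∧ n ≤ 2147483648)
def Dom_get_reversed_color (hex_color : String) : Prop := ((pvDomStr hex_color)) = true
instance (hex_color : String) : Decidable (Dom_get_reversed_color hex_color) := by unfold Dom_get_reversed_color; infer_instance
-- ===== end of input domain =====

-- B replaces A's per-character complement-dict loop by integer arithmetic: parse the hex
-- string, subtract from 0xFFFFFF and format back as 6 uppercase hex digits (objective: simpler).


-- ===== PORT A =====
-- the `complement` dict of A (insertion order; distinct keys)
def pvComplementA : PySem.Dict Char Char :=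
  PySem.Dict.ofList
    [('0','F'),('1','E'),('2','D'),('3','C'),('4','B'),('5','A'),('6','9'),('7','8'),
     ('8','7'),('9','6'),('A','5'),('B','4'),('C','3'),('D','2'),('E','1'),('F','0')]

-- A: `if len(hex) > 0 and hex[0] == "#": hex = hex[1:]`
def pvAStrip (l : List Char) : List Char :=
  if 0 < l.length ∧ PySem.List.pyGet? l 0 = some '#' then PySem.List.slice l (some 1) none else l

-- A: `hex = hex.rjust(6, "0")` (exact for the pad character "0")
def pvAPad (l : List Char) : List Char := List.replicate (6 - l.length) '0' ++ l

-- A: `for c in hex: if not c in complement: raise …; res.append(complement[c])`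
-- (none = the ValueError "Wrong colour code"; excluded by Pre_)
def pvLoopA : List Char → Option (List Char)
  | [] => some []
  | c :: rest =>
    match PySem.Dict.get? pvComplementA c with
    | none => none
    | some v =>
      match pvLoopA rest with
      | none => none
      | some r => some (v :: r)

def get_reversed_color (hex_color : String) : String :=
  if 6 < (pvAPad (pvAStrip (PySem.Chars.upper hex_color.toList))).length then ""  -- raise "Too long colour code" (outside Pre_)
  else
    match pvLoopA (pvAPad (pvAStrip (PySem.Chars.upper hex_color.toList))) with
    | none => ""                                                                  -- raise "Wrong colour code" (outside Pre_)
    | some res => String.ofList ('#' :: res)                                      -- f"#{''.join(res)}"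

-- ===== PORT B =====
-- the 22 characters of "0123456789abcdefABCDEF"
def pvHexDigits : List Char :=
  ['0','1','2','3','4','5','6','7','8','9','a','b','c','d','e','f','A','B','C','D','E','F']

-- digit value, exact for the 22 characters of pvHexDigits (what int(·, 16) assigns them)
def pvHexVal (c : Char) : Nat :=
  if c ≤ '9' then c.toNat - 48 else if c ≤ 'F' then c.toNat - 55 else c.toNat - 87

-- int(s, 16) on a validated string of hex digits (0 for the empty string, as in B)
def pvHVal (l : List Char) : Nat := l.foldl (fun n c => 16 * n + pvHexVal c) 0

-- uppercase hex digit character for a value < 16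
def pvHexChar (d : Nat) : Char := if d < 10 then Char.ofNat (48 + d) else Char.ofNat (55 + d)

-- hand port of the format f"{m:06X}" (used with width 6): exact for m < 16^6
def pvRender : Nat → Nat → List Char
  | 0, _ => []
  | k + 1, m => pvRender k (m / 16) ++ [pvHexChar (m % 16)]

-- B: `s = hex_color[1:] if hex_color[:1] == "#" else hex_color`
def pvBStrip (cs : List Char) : List Char := if cs.take 1 = ['#'] then cs.drop 1 else cs

def get_reversed_color_alt (hex_color : String) : String :=
  if 6 < (pvBStrip hex_color.toList).length then ""                    -- raise "Too long colour code" (outside Pre_)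
  else if ¬ (∀ c ∈ pvBStrip hex_color.toList, c ∈ pvHexDigits) then "" -- raise "Wrong colour code" (outside Pre_)
  else String.ofList ('#' :: pvRender 6 (16777215 - pvHVal (pvBStrip hex_color.toList)))  -- f"#{0xFFFFFF - n:06X}"

-- ===== PRECONDITION & SPEC =====
-- Pre_ excludes exactly the inputs where A raises a ValueError (more than 6 characters after an
-- optional leading hash mark, or a character that is not a hex digit); B raises the same ValueError there.
def Pre_get_reversed_color (hex_color : String) : Prop :=
  let s := if hex_color.toList.take 1 = ['#'] then hex_color.toList.drop 1 else hex_color.toList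
  s.length ≤ 6 ∧ s.all (fun c =>
    ['0','1','2','3','4','5','6','7','8','9','a','b','c','d','e','f','A','B','C','D','E','F'].contains c) = true
instance (hex_color : String) : Decidable (Pre_get_reversed_color hex_color) := by
  unfold Pre_get_reversed_color; infer_instance

def pvWitness_get_reversed_color : String := "#1aB"

def Spec_get_reversed_color (hex_color : String) (out : String) : Prop := out = get_reversed_color_alt hex_color
instance (hex_color : String) (out : String) : Decidable (Spec_get_reversed_color hex_color out) := by unfold Spec_get_reversed_color; infer_instance

-- ===== CLAIM (what is proved, stated in full; the proofs are below) =====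
def Claim_equal_get_reversed_color : Prop := ∀ (hex_color : String), Dom_get_reversed_color hex_color → Pre_get_reversed_color hex_color → Spec_get_reversed_color hex_color (get_reversed_color hex_color)

-- ===== LEMMAS AND PROOFS =====

-- the 16 possible characters of A's padded, uppercased string
def pvUpperHex : List Char :=
  ['0','1','2','3','4','5','6','7','8','9','A','B','C','D','E','F']

-- what A's table lookup returns on those characters
def pvCompU (c : Char) : Char := pvHexChar (15 - pvHexVal c)

theorem pvLookup_eq : ∀ c ∈ pvUpperHex, PySem.Dict.get? pvComplementA c = some (pvCompU c) := by
  intro c hc; fin_cases hc <;> decide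

theorem pvUpper_mem : ∀ c ∈ pvHexDigits, PySem.Chars.upperChar c ∈ pvUpperHex := by
  intro c hc; fin_cases hc <;> decide

theorem pvUpper_ne_hash : ∀ c ∈ pvHexDigits, PySem.Chars.upperChar c ≠ '#' := by
  intro c hc; fin_cases hc <;> decide

theorem pvUpperVal : ∀ c ∈ pvHexDigits, pvHexVal (PySem.Chars.upperChar c) = pvHexVal c := by
  intro c hc; fin_cases hc <;> decide

theorem pvVal_lt : ∀ c ∈ pvUpperHex, pvHexVal c < 16 := by
  intro c hc; fin_cases hc <;> decide

-- A's loop succeeds and is a map when every character is an uppercase hex digit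
theorem pvLoopA_eq_map (l : List Char) (h : ∀ c ∈ l, c ∈ pvUpperHex) :
    pvLoopA l = some (l.map pvCompU) := by
  induction l with
  | nil => rfl
  | cons c t ih =>
    have hc := pvLookup_eq c (h c List.mem_cons_self)
    have ht := ih (fun x hx => h x (List.mem_cons_of_mem c hx))
    simp [pvLoopA, hc, ht]

theorem pvHVal_replicate_zero (k : Nat) (l : List Char) :
    pvHVal (List.replicate k '0' ++ l) = pvHVal l := by
  induction k with
  | zero => simp
  | succ n ih => simpa [pvHVal, List.replicate_succ] using ih

theorem pvFoldl_map_upper :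
    ∀ (l : List Char), (∀ c ∈ l, c ∈ pvHexDigits) → ∀ a : Nat,
      (l.map PySem.Chars.upperChar).foldl (fun n c => 16 * n + pvHexVal c) a
        = l.foldl (fun n c => 16 * n + pvHexVal c) a := by
  intro l
  induction l with
  | nil => intro _ _; rfl
  | cons c t ih =>
    intro h a
    have hv : pvHexVal (PySem.Chars.upperChar c) = pvHexVal c :=
      pvUpperVal c (h c List.mem_cons_self)
    simp only [List.map_cons, List.foldl_cons, hv]
    exact ih (fun x hx => h x (List.mem_cons_of_mem c hx)) _

theorem pvHVal_map_upper (l : List Char) (h : ∀ c ∈ l, c ∈ pvHexDigits) :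
    pvHVal (l.map PySem.Chars.upperChar) = pvHVal l :=
  pvFoldl_map_upper l h 0

theorem pvFoldl_lt :
    ∀ (l : List Char), (∀ c ∈ l, c ∈ pvUpperHex) → ∀ a : Nat,
      l.foldl (fun n c => 16 * n + pvHexVal c) a < (a + 1) * 16 ^ l.length := by
  intro l
  induction l with
  | nil =>
    intro _ a
    simp only [List.foldl_nil, List.length_nil, pow_zero]
    omega
  | cons c t ih =>
    intro hl a
    have hv : pvHexVal c < 16 := pvVal_lt c (hl c List.mem_cons_self)
    have h1 := ih (fun x hx => hl x (List.mem_cons_of_mem c hx)) (16 * a + pvHexVal c)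
    have h2 : (16 * a + pvHexVal c + 1) * 16 ^ t.length ≤ ((a + 1) * 16) * 16 ^ t.length :=
      Nat.mul_le_mul_right _ (by omega)
    simp only [List.foldl_cons, List.length_cons, pow_succ]
    calc t.foldl (fun n c => 16 * n + pvHexVal c) (16 * a + pvHexVal c)
        < (16 * a + pvHexVal c + 1) * 16 ^ t.length := h1
      _ ≤ ((a + 1) * 16) * 16 ^ t.length := h2
      _ = (a + 1) * (16 ^ t.length * 16) := by ring

theorem pvHVal_lt (l : List Char) (h : ∀ c ∈ l, c ∈ pvUpperHex) :
    pvHVal l < 16 ^ l.length := by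
  simpa using pvFoldl_lt l h 0

-- the heart: rendering 16^n - 1 - value digit-by-digit complements each digit
theorem pvRender_comp (ds : List Char) (h : ∀ c ∈ ds, c ∈ pvUpperHex) :
    pvRender ds.length (16 ^ ds.length - 1 - pvHVal ds) = ds.map pvCompU := by
  induction ds using List.reverseRecOn with
  | nil => rfl
  | append_singleton ds d ih =>
    have hd : d ∈ pvUpperHex := h d (by simp)
    have hds : ∀ c ∈ ds, c ∈ pvUpperHex := fun c hc => h c (by simp [hc])
    have hV : pvHVal ds < 16 ^ ds.length := pvHVal_lt ds hds
    have he : pvHexVal d < 16 := pvVal_lt d hd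
    have hsnoc : pvHVal (ds ++ [d]) = 16 * pvHVal ds + pvHexVal d := by
      simp [pvHVal, List.foldl_append]
    have hlen : (ds ++ [d]).length = ds.length + 1 := by simp
    have hM : 16 ^ (ds.length + 1) - 1 - pvHVal (ds ++ [d])
        = 16 * (16 ^ ds.length - 1 - pvHVal ds) + (15 - pvHexVal d) := by
      rw [hsnoc, pow_succ]; omega
    have hdiv : (16 * (16 ^ ds.length - 1 - pvHVal ds) + (15 - pvHexVal d)) / 16
        = 16 ^ ds.length - 1 - pvHVal ds := by omega
    have hmod : (16 * (16 ^ ds.length - 1 - pvHVal ds) + (15 - pvHexVal d)) % 16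
        = 15 - pvHexVal d := by omega
    rw [hlen, hM]
    simp only [pvRender]
    rw [hdiv, hmod, ih hds]
    simp [pvCompU]

-- the value A's pipeline produces equals B's rendering, under Pre_
theorem pvA_value (s : List Char) (hlen : s.length ≤ 6) (hhex : ∀ c ∈ s, c ∈ pvHexDigits) :
    (pvAPad (s.map PySem.Chars.upperChar)).map pvCompU = pvRender 6 (16777215 - pvHVal s) := by
  have hpl : (pvAPad (s.map PySem.Chars.upperChar)).length = 6 := by
    simp [pvAPad]; omega
  have hpall : ∀ c ∈ pvAPad (s.map PySem.Chars.upperChar), c ∈ pvUpperHex := by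
    intro c hc
    rcases List.mem_append.1 hc with h0 | hm
    · have := List.eq_of_mem_replicate h0; subst this; decide
    · obtain ⟨x, hx, rfl⟩ := List.mem_map.1 hm
      exact pvUpper_mem x (hhex x hx)
  have hval : pvHVal (pvAPad (s.map PySem.Chars.upperChar)) = pvHVal s := by
    rw [pvAPad, pvHVal_replicate_zero, pvHVal_map_upper s hhex]
  have hmain := pvRender_comp (pvAPad (s.map PySem.Chars.upperChar)) hpall
  rw [hpl, hval] at hmain
  rw [← hmain]
  norm_num

-- A's uppercase-then-strip equals B's strip, uppercased (under the hex-digit hypothesis)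
theorem pvStrip_comm (cs : List Char) (h : ∀ c ∈ pvBStrip cs, c ∈ pvHexDigits) :
    pvAStrip (PySem.Chars.upper cs) = (pvBStrip cs).map PySem.Chars.upperChar := by
  match cs with
  | [] => rfl
  | c :: t =>
    by_cases hc : c = '#'
    · subst hc
      have hu : PySem.Chars.upper ('#' :: t) = '#' :: t.map PySem.Chars.upperChar := by
        simp [PySem.Chars.upper, (by decide : PySem.Chars.upperChar '#' = '#')]
      have hb : pvBStrip ('#' :: t) = t := by simp [pvBStrip]
      rw [hu, pvAStrip, if_pos ⟨by simp, by rw [PySem.List.pyGet?_zero_cons]⟩,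
        PySem.List.slice_from _ (by norm_num), hb]
      rfl
    · have hb : pvBStrip (c :: t) = c :: t := by simp [pvBStrip, hc]
      have hch : c ∈ pvHexDigits := by rw [hb] at h; exact h c List.mem_cons_self
      have hne : PySem.Chars.upperChar c ≠ '#' := pvUpper_ne_hash c hch
      have hu : PySem.Chars.upper (c :: t)
          = PySem.Chars.upperChar c :: t.map PySem.Chars.upperChar := by
        simp [PySem.Chars.upper]
      rw [hu, pvAStrip, if_neg, hb]
      · simp
      · rintro ⟨-, hg⟩
        rw [PySem.List.pyGet?_zero_cons] at hg
        exact hne (by injection hg)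

-- ===== VERDICT (by name: the statement is the Claim_ definition above) =====
theorem get_reversed_color_spec : Claim_equal_get_reversed_color := by
  intro hex_color _ hpre
  have hlen : (pvBStrip hex_color.toList).length ≤ 6 := hpre.1
  have hhex : ∀ c ∈ pvBStrip hex_color.toList, c ∈ pvHexDigits := by
    intro c hc
    have h2 : (pvBStrip hex_color.toList).all (fun c => pvHexDigits.contains c) = true := hpre.2
    rw [List.all_eq_true] at h2
    simpa using h2 c hc
  unfold Spec_get_reversed_color get_reversed_color get_reversed_color_alt
  rw [pvStrip_comm hex_color.toList hhex]
  have hpadlen : (pvAPad ((pvBStrip hex_color.toList).map PySem.Chars.upperChar)).length = 6 := by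
    simp [pvAPad]; omega
  have hall : ∀ c ∈ pvAPad ((pvBStrip hex_color.toList).map PySem.Chars.upperChar),
      c ∈ pvUpperHex := by
    intro c hc
    rcases List.mem_append.1 hc with h0 | hm
    · have := List.eq_of_mem_replicate h0; subst this; decide
    · obtain ⟨x, hx, rfl⟩ := List.mem_map.1 hm
      exact pvUpper_mem x (hhex x hx)
  rw [if_neg (by omega), if_neg (by omega), if_neg (by simp only [not_not]; exact hhex),
    pvLoopA_eq_map _ hall]
  simp only []
  rw [pvA_value (pvBStrip hex_color.toList) hlen hhex]
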